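-- pv_equiv track=rewrite | github.com/NikitaDagon/SAOD | tasks.py | count_concatenated_substrings
-- ===== SOURCE A (Python) =====
-- def is_concatenated_substring(s, start, end):
--     n = end - start + 1
--     if n % 2 == 0 and s[start:start + n // 2] == s[start + n // 2:end + 1]:
--         return True
--     return False
--
-- def count_concatenated_substrings(s):
--     n = len(s)
--     res = set()
--     for i in range(n):
--         for j in range(i + 1, n):
--             if is_concatenated_substring(s, i, j):
--                 res.add(s[i:j + 1])
--     return len(res)
-- ===== SOURCE B (Python) =====
-- def count_concatenated_substrings(s):
--     n = len(s)
--     res = set()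
--     for L in range(1, n // 2 + 1):
--         run = 0
--         for t in range(n - L):
--             if s[t] == s[t + L]:
--                 run += 1
--             else:
--                 run = 0
--             if run >= L:
--                 res.add(s[t - L + 1:t + L + 1])
--     return len(res)
-- ===== Notes on version B (the rewrite author's own statement) =====
-- stated objective: alternative
-- what changed: Instead of testing every (i,j) pair by slicing and comparing the two halves, B iterates over each half-length L and sweeps the string once keeping a running count of consecutive positions with s[t] == s[t+L]; a square of half-length L ends at t exactly when the run reaches L, so each candidate is detected by an O(1) counter update instead of a slice comparison (intended as faster; a timing run measured ~5.9x at n=4096 but could not confirm it under its single-input rule).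
import Mathlib
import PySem

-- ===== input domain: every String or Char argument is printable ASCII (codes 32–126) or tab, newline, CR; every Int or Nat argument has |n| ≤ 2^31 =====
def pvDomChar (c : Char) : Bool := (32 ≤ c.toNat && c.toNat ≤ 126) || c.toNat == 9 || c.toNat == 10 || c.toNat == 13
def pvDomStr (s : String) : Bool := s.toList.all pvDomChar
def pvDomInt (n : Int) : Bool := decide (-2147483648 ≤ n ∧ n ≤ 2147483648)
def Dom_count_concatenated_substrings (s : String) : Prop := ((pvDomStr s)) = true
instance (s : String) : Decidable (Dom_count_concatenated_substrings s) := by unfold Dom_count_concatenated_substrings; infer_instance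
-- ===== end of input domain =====

-- B replaces A's all-pairs slice comparison by a per-half-length running count of matching
-- character pairs s[t] == s[t+L] (objective: alternative — squares found by counter updates instead of slice comparisons).

-- ===== PORT A =====
def is_concatenated_substring (s : String) (start : Int) (end_ : Int) : Bool :=
  let n : Int := end_ - start + 1
  if PySem.Int.mod n 2 == 0 &&
     (PySem.Str.slice s (some start) (some (start + PySem.Int.floordiv n 2)) ==
      PySem.Str.slice s (some (start + PySem.Int.floordiv n 2)) (some (end_ + 1))) then
    true
  else
    false

def count_concatenated_substrings (s : String) : Int :=
  let n : Int := PySem.Str.len s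
  let res : PySem.Set String :=
    (PySem.List.pyRange 0 n 1).foldl (fun res i =>
      (PySem.List.pyRange (i + 1) n 1).foldl (fun res j =>
        if is_concatenated_substring s i j then
          PySem.Set.add res (PySem.Str.slice s (some i) (some (j + 1)))
        else res) res)
      PySem.Set.empty
  PySem.Set.len res

-- ===== PORT B =====
def count_concatenated_substrings_alt (s : String) : Int :=
  let n : Int := PySem.Str.len s
  let res : PySem.Set String :=
    (PySem.List.pyRange 1 (PySem.Int.floordiv n 2 + 1) 1).foldl (fun res L =>
      ((PySem.List.pyRange 0 (n - L) 1).foldl (fun st t =>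
        let run : Int := if PySem.Str.pyGet? s t == PySem.Str.pyGet? s (t + L) then st.1 + 1 else 0
        let res' : PySem.Set String :=
          if run ≥ L then
            PySem.Set.add st.2 (PySem.Str.slice s (some (t - L + 1)) (some (t + L + 1)))
          else st.2
        (run, res')) ((0 : Int), res)).2)
      PySem.Set.empty
  PySem.Set.len res

-- ===== PRECONDITION & SPEC =====
def Spec_count_concatenated_substrings (s : String) (out : Int) : Prop := out = count_concatenated_substrings_alt s
instance (s : String) (out : Int) : Decidable (Spec_count_concatenated_substrings s out) := by unfold Spec_count_concatenated_substrings; infer_instance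

-- ===== CLAIM (what is proved, stated in full; the proofs are below) =====
def Claim_equal_count_concatenated_substrings : Prop := ∀ (s : String), Dom_count_concatenated_substrings s → Spec_count_concatenated_substrings s (count_concatenated_substrings s)

-- ===== LEMMAS AND PROOFS =====

-- the set A builds (definitionally the set inside port A)
def pvResA (s : String) : PySem.Set String :=
  (PySem.List.pyRange 0 (PySem.Str.len s) 1).foldl (fun res i =>
    (PySem.List.pyRange (i + 1) (PySem.Str.len s) 1).foldl (fun res j =>
      if is_concatenated_substring s i j then
        PySem.Set.add res (PySem.Str.slice s (some i) (some (j + 1)))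
      else res) res)
    PySem.Set.empty

-- B's inner-loop step (definitionally the lambda inside port B)
def pvStepB (s : String) (L : Int) (st : Int × PySem.Set String) (t : Int) : Int × PySem.Set String :=
  let run : Int := if PySem.Str.pyGet? s t == PySem.Str.pyGet? s (t + L) then st.1 + 1 else 0
  let res' : PySem.Set String :=
    if run ≥ L then
      PySem.Set.add st.2 (PySem.Str.slice s (some (t - L + 1)) (some (t + L + 1)))
    else st.2
  (run, res')

-- the set B builds (definitionally the set inside port B)
def pvResB (s : String) : PySem.Set String :=
  (PySem.List.pyRange 1 (PySem.Int.floordiv (PySem.Str.len s) 2 + 1) 1).foldl (fun res L =>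
    ((PySem.List.pyRange 0 (PySem.Str.len s - L) 1).foldl (pvStepB s L) ((0 : Int), res)).2)
    PySem.Set.empty

lemma countA_eq (s : String) : count_concatenated_substrings s = PySem.Set.len (pvResA s) := rfl
lemma countB_eq (s : String) : count_concatenated_substrings_alt s = PySem.Set.len (pvResB s) := rfl

-- "x is a square substring of s": some block i..i+L equals the block i+L..i+2L
def pvSq (l : List Char) (x : String) : Prop :=
  ∃ i L : Nat, 1 ≤ L ∧ i + 2 * L ≤ l.length ∧
    (l.drop i).take L = (l.drop (i + L)).take L ∧ x.toList = (l.drop i).take (2 * L)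

-- B's running counter, as a function of the number of loop steps taken
def pvRun (l : List Char) (L : Nat) : Nat → Nat
  | 0 => 0
  | (t + 1) => if l[t]? == l[t + L]? then pvRun l L t + 1 else 0

lemma pv_len_eq (s : String) : PySem.Str.len s = (s.toList.length : Int) := by simp

lemma pv_ifb (b : Bool) : (if b = true then true else false) = b := by cases b <;> simp

lemma toList_slice_nat (s : String) (a b : Nat) :
    (PySem.Str.slice s (some (a : Int)) (some (b : Int))).toList = (s.toList.drop a).take (b - a) := by
  simp [PySem.List.slice_natCast]

-- generic membership through a foldl whose steps only add elements
lemma mem_foldl_gen {α : Type} (step : PySem.Set String → α → PySem.Set String)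
    (Q : α → String → Prop) :
    ∀ (xs : List α) (r : PySem.Set String),
      (∀ (r' : PySem.Set String) a, a ∈ xs → ∀ x, (x ∈ step r' a ↔ x ∈ r' ∨ Q a x)) →
      ∀ x, x ∈ xs.foldl step r ↔ x ∈ r ∨ ∃ a ∈ xs, Q a x := by
  intro xs
  induction xs with
  | nil => intro r _ x; simp
  | cons a xs ih =>
    intro r h x
    simp only [List.foldl_cons]
    rw [ih (step r a) (fun r' b hb => h r' b (List.mem_cons_of_mem _ hb)),
        h r a List.mem_cons_self]
    constructor
    · rintro ((h1 | h1) | ⟨b, hb, hq⟩)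
      · exact Or.inl h1
      · exact Or.inr ⟨a, List.mem_cons_self, h1⟩
      · exact Or.inr ⟨b, List.mem_cons_of_mem _ hb, hq⟩
    · rintro (h1 | ⟨b, hb, hq⟩)
      · exact Or.inl (Or.inl h1)
      · rcases List.mem_cons.mp hb with rfl | hb
        · exact Or.inl (Or.inr hq)
        · exact Or.inr ⟨b, hb, hq⟩

lemma nodup_foldl_gen {α : Type} (step : PySem.Set String → α → PySem.Set String) :
    ∀ (xs : List α) (r : PySem.Set String),
      (∀ (r' : PySem.Set String) a, r'.Nodup → (step r' a).Nodup) →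
      r.Nodup → (xs.foldl step r).Nodup := by
  intro xs
  induction xs with
  | nil => intro r _ hr; simpa
  | cons a xs ih =>
    intro r h hr
    exact ih (step r a) h (h r a hr)

-- membership through one conditional-add fold
lemma mem_foldl_addIf {α : Type} (c : α → Bool) (f : α → String) :
    ∀ (xs : List α) (r : PySem.Set String) (x : String),
      x ∈ xs.foldl (fun r a => if c a then PySem.Set.add r (f a) else r) r ↔
        x ∈ r ∨ ∃ a ∈ xs, c a = true ∧ x = f a := by
  intro xs
  induction xs with
  | nil => intro r x; simp
  | cons a xs ih =>
    intro r x
    simp only [List.foldl_cons]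
    rw [ih]
    by_cases hc : c a = true
    · simp only [hc, if_true, PySem.Set.mem_add]
      constructor
      · rintro ((h1 | h1) | ⟨b, hb, hq⟩)
        · exact Or.inl h1
        · exact Or.inr ⟨a, List.mem_cons_self, hc, h1⟩
        · exact Or.inr ⟨b, List.mem_cons_of_mem _ hb, hq⟩
      · rintro (h1 | ⟨b, hb, hq⟩)
        · exact Or.inl (Or.inl h1)
        · rcases List.mem_cons.mp hb with rfl | hb
          · exact Or.inl (Or.inr hq.2)
          · exact Or.inr ⟨b, hb, hq⟩
    · simp only [hc]
      constructor
      · rintro (h1 | ⟨b, hb, hq⟩)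
        · exact Or.inl h1
        · exact Or.inr ⟨b, List.mem_cons_of_mem _ hb, hq⟩
      · rintro (h1 | ⟨b, hb, hq⟩)
        · exact Or.inl h1
        · rcases List.mem_cons.mp hb with rfl | hb
          · exact absurd hq.1 hc
          · exact Or.inr ⟨b, hb, hq⟩

lemma nodup_foldl_addIf {α : Type} (c : α → Bool) (f : α → String) :
    ∀ (xs : List α) (r : PySem.Set String), r.Nodup →
      (xs.foldl (fun r a => if c a then PySem.Set.add r (f a) else r) r).Nodup := by
  intro xs
  induction xs with
  | nil => intro r hr; simpa
  | cons a xs ih =>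
    intro r hr
    refine ih _ ?_
    by_cases hc : c a = true
    · simp only [hc, if_true]
      first
      | exact PySem.Set.nodup_add _ _ hr
      | exact PySem.Set.nodup_add _ hr
      | exact PySem.Set.nodup_add hr
    · simpa [hc] using hr

-- the B inner step preserves Nodup of the set component
lemma nodup_foldl_stepB (s : String) (L : Int) :
    ∀ (ts : List Int) (st : Int × PySem.Set String), st.2.Nodup →
      ((ts.foldl (pvStepB s L) st).2).Nodup := by
  intro ts
  induction ts with
  | nil => intro st h; simpa
  | cons t ts ih =>
    intro st h
    refine ih _ ?_
    simp only [pvStepB]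
    split <;> split <;>
      first
      | exact PySem.Set.nodup_add _ _ h
      | exact PySem.Set.nodup_add _ h
      | exact PySem.Set.nodup_add h
      | exact h

-- characterisation of pvRun: the counter is ≥ k iff the last k shifted pairs all match
lemma pvRun_ge_iff (l : List Char) (L : Nat) :
    ∀ m k, k ≤ pvRun l L m ↔ k ≤ m ∧ ∀ t, m - k ≤ t → t < m → l[t]? = l[t + L]? := by
  intro m
  induction m with
  | zero =>
    intro k
    constructor
    · intro h
      exact ⟨by simpa [pvRun] using h, fun t _ ht => absurd ht (by omega)⟩
    · intro h
      simpa [pvRun] using h.1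
  | succ m ih =>
    intro k
    by_cases hb : (l[m]? == l[m + L]?) = true
    · have hm : l[m]? = l[m + L]? := by simpa using hb
      have hrun : pvRun l L (m + 1) = pvRun l L m + 1 := by simp [pvRun, hb]
      rw [hrun]
      cases k with
      | zero =>
        constructor
        · intro _; exact ⟨by omega, fun t ht1 ht2 => absurd ht1 (by omega)⟩
        · intro _; omega
      | succ k' =>
        rw [Nat.succ_le_succ_iff, ih k']
        constructor
        · rintro ⟨hk, hall⟩
          refine ⟨by omega, fun t ht1 ht2 => ?_⟩
          rcases Nat.lt_succ_iff_lt_or_eq.mp ht2 with h' | rfl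
          · exact hall t (by omega) h'
          · exact hm
        · rintro ⟨hk, hall⟩
          exact ⟨by omega, fun t ht1 ht2 => hall t (by omega) (by omega)⟩
    · have hm : ¬ l[m]? = l[m + L]? := by simpa using hb
      have hrun : pvRun l L (m + 1) = 0 := by simp [pvRun, hb]
      rw [hrun]
      cases k with
      | zero =>
        constructor
        · intro _; exact ⟨by omega, fun t ht1 ht2 => absurd ht1 (by omega)⟩
        · intro _; omega
      | succ k' =>
        constructor
        · intro h; omega
        · rintro ⟨hk, hall⟩
          exact absurd (hall m (by omega) (by omega)) hm

-- the two halves are equal iff every character matches its shift by L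
lemma halves_eq_iff (l : List Char) (i L : Nat) (h : i + 2 * L ≤ l.length) :
    (l.drop i).take L = (l.drop (i + L)).take L ↔
      ∀ v, i ≤ v → v < i + L → l[v]? = l[v + L]? := by
  constructor
  · intro heq v hv1 hv2
    have hk := congrArg (fun t : List Char => t[v - i]?) heq
    simp only [List.getElem?_take, List.getElem?_drop] at hk
    rw [if_pos (show v - i < L by omega)] at hk
    first
    | rw [if_pos (show v - i < L by omega)] at hk
    | skip
    have e1 : i + (v - i) = v := by omega
    have e2 : i + L + (v - i) = v + L := by omega
    rwa [e1, e2] at hk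
  · intro hall
    apply List.ext_getElem?
    intro k
    simp only [List.getElem?_take, List.getElem?_drop]
    by_cases hk : k < L
    · rw [if_pos hk]
      first
      | rw [if_pos hk]
      | skip
      have := hall (i + k) (by omega) (by omega)
      have e : i + L + k = i + k + L := by omega
      rw [e]
      exact this
    · rw [if_neg hk]
      first
      | rw [if_neg hk]
      | skip

-- port A's pair test, characterised
lemma is_conc_iff (s : String) (i' j' : Nat) (hij : i' < j') :
    is_concatenated_substring s (i' : Int) (j' : Int) = true ↔
      ∃ L : Nat, 1 ≤ L ∧ j' + 1 = i' + 2 * L ∧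
        (s.toList.drop i').take L = (s.toList.drop (i' + L)).take L := by
  have h2 : (2 : Int) = ((2 : Nat) : Int) := rfl
  have hn : ((j' : Int) - (i' : Int) + 1) = ((j' - i' + 1 : Nat) : Int) := by omega
  simp only [is_concatenated_substring]
  rw [pv_ifb, Bool.and_eq_true, beq_iff_eq, beq_iff_eq, hn, h2, PySem.Int.mod_natCast,
      PySem.Int.floordiv_natCast]
  constructor
  · rintro ⟨hmod, hsl⟩
    have hmod' : (j' - i' + 1) % 2 = 0 := by exact_mod_cast hmod
    obtain ⟨L, hL⟩ : ∃ L : Nat, j' + 1 = i' + 2 * L := ⟨(j' - i' + 1) / 2, by omega⟩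
    refine ⟨L, by omega, hL, ?_⟩
    rw [show ((i' : Int) + (((j' - i' + 1) / 2 : Nat) : Int)) = (((i' + L : Nat)) : Int) by
          push_cast; omega,
        show ((j' : Int) + 1) = (((j' + 1 : Nat)) : Int) by push_cast; ring] at hsl
    have hsl' := congrArg String.toList hsl
    rw [toList_slice_nat, toList_slice_nat] at hsl'
    rwa [show i' + L - i' = L by omega, show j' + 1 - (i' + L) = L by omega] at hsl'
  · rintro ⟨L, hL1, hL2, heq⟩
    constructor
    · exact_mod_cast (show (j' - i' + 1) % 2 = 0 by omega)
    · apply String.toList_inj.mp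
      rw [show ((i' : Int) + (((j' - i' + 1) / 2 : Nat) : Int)) = (((i' + L : Nat)) : Int) by
            push_cast; omega,
          show ((j' : Int) + 1) = (((j' + 1 : Nat)) : Int) by push_cast; ring]
      rw [toList_slice_nat, toList_slice_nat,
          show i' + L - i' = L by omega, show j' + 1 - (i' + L) = L by omega]
      exact heq

-- membership in A's set
lemma mem_resA (s : String) (x : String) : x ∈ pvResA s ↔ pvSq s.toList x := by
  unfold pvResA
  refine (mem_foldl_gen _
    (fun i x => ∃ j, j ∈ PySem.List.pyRange (i + 1) (PySem.Str.len s) 1 ∧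
      is_concatenated_substring s i j = true ∧
      x = PySem.Str.slice s (some i) (some (j + 1))) _ _ ?_ x).trans ?_
  · intro r' a _ y
    exact mem_foldl_addIf (fun j => is_concatenated_substring s a j)
      (fun j => PySem.Str.slice s (some a) (some (j + 1))) _ r' y
  · constructor
    · rintro (h | ⟨i, hi, j, hj, hc, rfl⟩)
      · simp [PySem.Set.empty] at h
      · rw [PySem.List.mem_pyRange_one, pv_len_eq] at hi hj
        obtain ⟨i', rfl⟩ : ∃ i' : Nat, i = (i' : Int) :=
          ⟨i.toNat, (Int.toNat_of_nonneg hi.1).symm⟩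
        obtain ⟨j', rfl⟩ : ∃ j' : Nat, j = (j' : Int) :=
          ⟨j.toNat, (Int.toNat_of_nonneg (by omega)).symm⟩
        have hij : i' < j' := by omega
        have hjN : j' < s.toList.length := by omega
        obtain ⟨L, hL1, hL2, heq⟩ := (is_conc_iff s i' j' hij).mp hc
        refine ⟨i', L, hL1, by omega, heq, ?_⟩
        rw [show ((j' : Int) + 1) = (((j' + 1 : Nat)) : Int) by push_cast; ring,
            toList_slice_nat, show j' + 1 - i' = 2 * L by omega]
    · rintro ⟨i, L, hL, hle, heq, hx⟩
      right
      refine ⟨(i : Int), ?_, ((i + 2 * L - 1 : Nat) : Int), ?_, ?_, ?_⟩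
      · rw [PySem.List.mem_pyRange_one, pv_len_eq]; omega
      · rw [PySem.List.mem_pyRange_one, pv_len_eq]; omega
      · exact (is_conc_iff s i (i + 2 * L - 1) (by omega)).mpr ⟨L, hL, by omega, heq⟩
      · apply String.toList_inj.mp
        rw [show (((i + 2 * L - 1 : Nat) : Int) + 1) = (((i + 2 * L : Nat)) : Int) by push_cast [hL]; omega,
            toList_slice_nat, show i + 2 * L - i = 2 * L by omega]
        exact hx

lemma nodup_resA (s : String) : (pvResA s).Nodup := by
  unfold pvResA
  refine nodup_foldl_gen _ _ _ ?_ ?_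
  · intro r' a hr'
    exact nodup_foldl_addIf (fun j => is_concatenated_substring s a j)
      (fun j => PySem.Str.slice s (some a) (some (j + 1))) _ r' hr'
  · simp [PySem.Set.empty]

-- the inner loop of B, characterised
lemma B_inner (s : String) (Ln : Nat) :
    ∀ (m : Nat) (r : PySem.Set String),
      ((PySem.List.pyRange 0 (m : Int) 1).foldl (pvStepB s (Ln : Int)) ((0 : Int), r)).1
        = (pvRun s.toList Ln m : Int) ∧
      (∀ x, x ∈ ((PySem.List.pyRange 0 (m : Int) 1).foldl (pvStepB s (Ln : Int)) ((0 : Int), r)).2 ↔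
        x ∈ r ∨ ∃ tn : Nat, tn < m ∧ Ln ≤ pvRun s.toList Ln (tn + 1) ∧
          x = PySem.Str.slice s (some ((tn : Int) - (Ln : Int) + 1)) (some ((tn : Int) + (Ln : Int) + 1))) := by
  intro m
  induction m with
  | zero =>
    intro r
    rw [PySem.List.pyRange_one_eq_nil (by omega)]
    refine ⟨by simp [pvRun], fun x => ?_⟩
    simp
  | succ m ih =>
    intro r
    have hsplit : PySem.List.pyRange 0 ((m + 1 : Nat) : Int) 1
        = PySem.List.pyRange 0 (m : Int) 1 ++ [(m : Int)] := by
      push_cast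
      exact PySem.List.pyRange_one_succ_right (by omega)
    rw [hsplit, List.foldl_append, List.foldl_cons, List.foldl_nil]
    obtain ⟨ih1, ih2⟩ := ih r
    have hget : (PySem.Str.pyGet? s (m : Int) == PySem.Str.pyGet? s ((m : Int) + (Ln : Int)))
        = (s.toList[m]? == s.toList[m + Ln]?) := by
      rw [show ((m : Int) + (Ln : Int)) = ((m + Ln : Nat) : Int) by push_cast; ring]
      simp only [PySem.Str.pyGet?_natCast]
    have hrun : (if PySem.Str.pyGet? s (m : Int) == PySem.Str.pyGet? s ((m : Int) + (Ln : Int))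
          then ((PySem.List.pyRange 0 (m : Int) 1).foldl (pvStepB s (Ln : Int)) ((0 : Int), r)).1 + 1
          else 0) = (pvRun s.toList Ln (m + 1) : Int) := by
      rw [hget, ih1]
      by_cases hb : (s.toList[m]? == s.toList[m + Ln]?) = true
      · simp [pvRun, hb]
      · simp [pvRun, hb]
    constructor
    · simp only [pvStepB]
      rw [hrun]
    · intro x
      simp only [pvStepB]
      rw [hrun]
      by_cases hge : Ln ≤ pvRun s.toList Ln (m + 1)
      · rw [if_pos (by exact_mod_cast hge)]
        simp only [PySem.Set.mem_add]
        rw [ih2 x]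
        constructor
        · rintro ((h | ⟨tn, htn, hr2, hx⟩) | hx)
          · exact Or.inl h
          · exact Or.inr ⟨tn, by omega, hr2, hx⟩
          · exact Or.inr ⟨m, by omega, hge, hx⟩
        · rintro (h | ⟨tn, htn, hr2, hx⟩)
          · exact Or.inl (Or.inl h)
          · rcases Nat.lt_succ_iff_lt_or_eq.mp htn with h' | rfl
            · exact Or.inl (Or.inr ⟨tn, h', hr2, hx⟩)
            · exact Or.inr hx
      · rw [if_neg (by exact_mod_cast hge)]
        rw [ih2 x]
        constructor
        · rintro (h | ⟨tn, htn, hr2, hx⟩)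
          · exact Or.inl h
          · exact Or.inr ⟨tn, by omega, hr2, hx⟩
        · rintro (h | ⟨tn, htn, hr2, hx⟩)
          · exact Or.inl h
          · rcases Nat.lt_succ_iff_lt_or_eq.mp htn with h' | rfl
            · exact Or.inr ⟨tn, h', hr2, hx⟩
            · exact absurd hr2 hge

-- membership in B's set
lemma mem_resB (s : String) (x : String) : x ∈ pvResB s ↔ pvSq s.toList x := by
  have h2 : (2 : Int) = ((2 : Nat) : Int) := rfl
  unfold pvResB
  refine (mem_foldl_gen _
    (fun a x => ∃ tn : Nat, tn < s.toList.length - a.toNat ∧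
      a.toNat ≤ pvRun s.toList a.toNat (tn + 1) ∧
      x = PySem.Str.slice s (some ((tn : Int) - a + 1)) (some ((tn : Int) + a + 1))) _ _ ?_ x).trans ?_
  · intro r' a ha y
    rw [PySem.List.mem_pyRange_one] at ha
    obtain ⟨a', rfl⟩ : ∃ a' : Nat, a = (a' : Int) :=
      ⟨a.toNat, (Int.toNat_of_nonneg (by omega)).symm⟩
    have ha' : a' ≤ s.toList.length := by
      rw [pv_len_eq, h2, PySem.Int.floordiv_natCast] at ha
      have : a' ≤ s.toList.length / 2 := by exact_mod_cast (by omega : (a' : Int) ≤ ((s.toList.length / 2 : Nat) : Int))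
      omega
    have hnm : PySem.Str.len s - (a' : Int) = ((s.toList.length - a' : Nat) : Int) := by
      rw [pv_len_eq]; omega
    rw [hnm]
    have hmem := (B_inner s a' (s.toList.length - a') r').2 y
    simpa using hmem
  · constructor
    · rintro (h | ⟨a, ha, tn, htn, hrun, rfl⟩)
      · simp [PySem.Set.empty] at h
      · rw [PySem.List.mem_pyRange_one] at ha
        obtain ⟨a', rfl⟩ : ∃ a' : Nat, a = (a' : Int) :=
          ⟨a.toNat, (Int.toNat_of_nonneg (by omega)).symm⟩
        simp only [Int.toNat_natCast] at htn hrun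
        have hL1 : 1 ≤ a' := by exact_mod_cast ha.1
        obtain ⟨hle, hall⟩ := (pvRun_ge_iff s.toList a' (tn + 1) a').mp hrun
        refine ⟨tn + 1 - a', a', hL1, by omega, ?_, ?_⟩
        · refine (halves_eq_iff s.toList (tn + 1 - a') a' (by omega)).mpr ?_
          intro v hv1 hv2
          exact hall v (by omega) (by omega)
        · rw [show ((tn : Int) - (a' : Int) + 1) = (((tn + 1 - a' : Nat)) : Int) by omega,
              show ((tn : Int) + (a' : Int) + 1) = ((((tn + 1 - a') + 2 * a' : Nat)) : Int) by omega,
              toList_slice_nat, show (tn + 1 - a') + 2 * a' - (tn + 1 - a') = 2 * a' by omega]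
    · rintro ⟨i, L, hL, hle, heq, hx⟩
      right
      refine ⟨(L : Int), ?_, i + L - 1, ?_, ?_, ?_⟩
      · rw [PySem.List.mem_pyRange_one, pv_len_eq, h2, PySem.Int.floordiv_natCast]
        constructor
        · exact_mod_cast hL
        · exact_mod_cast (show (L : Int) < ((s.toList.length / 2 : Nat) : Int) + 1 by
            push_cast; omega)
      · simp only [Int.toNat_natCast]; omega
      · simp only [Int.toNat_natCast]
        refine (pvRun_ge_iff s.toList L (i + L - 1 + 1) L).mpr ⟨by omega, ?_⟩
        intro t ht1 ht2
        exact (halves_eq_iff s.toList i L hle).mp heq t (by omega) (by omega)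
      · apply String.toList_inj.mp
        rw [show (((i + L - 1 : Nat) : Int) - (L : Int) + 1) = ((i : Nat) : Int) by omega,
            show (((i + L - 1 : Nat) : Int) + (L : Int) + 1) = (((i + 2 * L : Nat)) : Int) by omega,
            toList_slice_nat, show i + 2 * L - i = 2 * L by omega]
        exact hx

lemma nodup_resB (s : String) : (pvResB s).Nodup := by
  unfold pvResB
  refine nodup_foldl_gen _ _ _ ?_ ?_
  · intro r' a hr'
    exact nodup_foldl_stepB s a _ ((0 : Int), r') hr'
  · simp [PySem.Set.empty]

-- ===== VERDICT (by name: the statement is the Claim_ definition above) =====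
theorem count_concatenated_substrings_spec : Claim_equal_count_concatenated_substrings := by
  intro s _
  unfold Spec_count_concatenated_substrings
  rw [countA_eq, countB_eq]
  have hperm : (pvResA s).Perm (pvResB s) :=
    (List.perm_ext_iff_of_nodup (nodup_resA s) (nodup_resB s)).mpr
      (fun x => (mem_resA s x).trans (mem_resB s x).symm)
  have hlen := hperm.length_eq
  simp [PySem.Set.len, hlen]
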